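-- pv_equiv track=rewrite | github.com/anis-metref/fail2ban-flask | fail2ban_service.py | parse_global_status
-- ===== SOURCE A (Python) =====
-- from typing import Dict, Tuple, List
--
-- def parse_global_status(output: str) -> Dict:
--     jails: List[str] = []
--     for line in output.splitlines():
--         line = line.strip()
--         if line.lower().startswith("`- jail list:") or line.lower().startswith("- jail list:"):
--             parts = line.split(":", 1)
--             if len(parts) == 2:
--                 raw = parts[1].strip()
--                 raw = raw.replace(",", " ")
--                 jails = [x.strip() for x in raw.split() if x.strip()]
--     return {"jails": jails}
-- ===== SOURCE B (Python) =====
-- from typing import Dict, List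
--
-- def parse_global_status(output: str) -> Dict:
--     # scan from the end: the last matching line wins, so the first match in reverse is the answer
--     for line in reversed(output.splitlines()):
--         s = line.strip()
--         low = s.lower()
--         if low.startswith("`- jail list:") or low.startswith("- jail list:"):
--             raw = s.split(":", 1)[1]
--             return {"jails": raw.replace(",", " ").split()}
--     return {"jails": []}
-- ===== Notes on version B (the rewrite author's own statement) =====
-- stated objective: simpler
-- what changed: B scans the split lines in reverse and returns the first (i.e. last) matching line's token list directly via an early return, instead of A's forward loop that keeps overwriting an accumulator; B also drops A's redundant per-token strip/filter and the redundant strip of the text after the colon, since whitespace-split already yields non-empty, whitespace-free tokens.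
import Mathlib
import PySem

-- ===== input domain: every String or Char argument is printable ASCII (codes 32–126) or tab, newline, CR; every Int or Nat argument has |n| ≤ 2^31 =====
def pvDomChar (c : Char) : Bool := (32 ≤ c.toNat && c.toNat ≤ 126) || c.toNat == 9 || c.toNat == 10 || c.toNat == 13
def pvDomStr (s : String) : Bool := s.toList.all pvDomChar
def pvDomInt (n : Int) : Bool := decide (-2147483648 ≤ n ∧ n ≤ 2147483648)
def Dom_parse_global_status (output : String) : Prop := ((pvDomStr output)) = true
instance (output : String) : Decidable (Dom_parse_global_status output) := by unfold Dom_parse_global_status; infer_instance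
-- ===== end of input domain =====

-- B replaces A's overwrite-the-accumulator line loop by a reverse scan that returns the first
-- (i.e. last) matching line's token list directly, dropping A's redundant per-token strip/filter;
-- objective: simpler.

-- ===== PORT A =====
-- loop body of A's 'for line in output.splitlines()'
def pgsStepA (jails : List String) (line0 : String) : List String :=
  let line := PySem.Str.strip line0
  if PySem.Str.startswith (PySem.Str.lower line) "`- jail list:" ||
     PySem.Str.startswith (PySem.Str.lower line) "- jail list:" then
    -- parts = line.split(":", 1); the pattern 'some [_, p1]' is the 'len(parts) == 2' test
    match PySem.Str.splitMax? line ":" 1 with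
    | some [_, p1] =>
        let raw := PySem.Str.strip p1
        let raw := PySem.Str.replace raw "," " "
        ((PySem.Str.split₀ raw).filter (fun x => !(PySem.Str.strip x == ""))).map
          (fun x => PySem.Str.strip x)
    | _ => jails
  else jails

def parse_global_status (output : String) : List (String × List String) :=
  [("jails", (PySem.Str.splitlines output).foldl pgsStepA [])]

-- ===== PORT B =====
-- B's loop: the first matching line of the reversed line list wins (early return)
def pgsFindB : List String → List String
  | [] => []
  | line :: rest =>
      let s := PySem.Str.strip line
      let low := PySem.Str.lower s
      if PySem.Str.startswith low "`- jail list:" || PySem.Str.startswith low "- jail list:" then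
        -- raw = s.split(":", 1)[1]; the matched prefix contains ':' so the index never fails
        let raw := ((PySem.Str.splitMax? s ":" 1).bind
          (fun parts => PySem.List.pyGet? parts 1)).getD ""
        PySem.Str.split₀ (PySem.Str.replace raw "," " ")
      else pgsFindB rest

def parse_global_status_alt (output : String) : List (String × List String) :=
  [("jails", pgsFindB (PySem.Str.splitlines output).reverse)]

-- ===== PRECONDITION & SPEC =====
def Spec_parse_global_status (output : String) (out : List (String × List String)) : Prop := out = parse_global_status_alt output
instance (output : String) (out : List (String × List String)) : Decidable (Spec_parse_global_status output out) := by unfold Spec_parse_global_status; infer_instance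

-- ===== CLAIM (what is proved, stated in full; the proofs are below) =====
def Claim_equal_parse_global_status : Prop := ∀ (output : String), Dom_parse_global_status output → Spec_parse_global_status output (parse_global_status output)

-- ===== LEMMAS AND PROOFS =====

-- the character map that '.replace(",", " ")' performs
def pgsF (c : Char) : Char := if c = ',' then ' ' else c

-- the match condition both loops test
def pgsCond (line : String) : Bool :=
  PySem.Str.startswith (PySem.Str.lower (PySem.Str.strip line)) "`- jail list:" ||
  PySem.Str.startswith (PySem.Str.lower (PySem.Str.strip line)) "- jail list:"

lemma pgsGoZero (fuel : ℕ) (l cur : List Char) (acc : List (List Char)) :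
    PySem.Chars.splitOnMax.go [':'] fuel 0 l cur acc = ((cur.reverse ++ l) :: acc).reverse := by
  cases fuel <;> cases l <;> simp [PySem.Chars.splitOnMax.go]

lemma pgsGoPair (fuel : ℕ) : ∀ (l cur : List Char) (acc : List (List Char)),
    l.length < fuel → ':' ∈ l →
    ∃ a b, PySem.Chars.splitOnMax.go [':'] fuel 1 l cur acc = acc.reverse ++ [a, b] := by
  induction fuel with
  | zero => intro l cur acc h; omega
  | succ fuel ih =>
      intro l cur acc hlen hmem
      cases l with
      | nil => simp at hmem
      | cons c rest =>
          by_cases hp : [':'].isPrefixOf (c :: rest) = true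
          · refine ⟨cur.reverse, rest, ?_⟩
            simp [PySem.Chars.splitOnMax.go, hp, pgsGoZero]
          · have hc : c ≠ ':' := by
              intro heq; apply hp; simp [List.isPrefixOf, heq]
            have hmem' : ':' ∈ rest := by
              rcases List.mem_cons.mp hmem with heq | hm
              · exact absurd heq.symm hc
              · exact hm
            obtain ⟨a, b, hab⟩ :=
              ih rest (c :: cur) acc (by simpa using Nat.lt_of_succ_lt_succ hlen) hmem'
            exact ⟨a, b, by simp [PySem.Chars.splitOnMax.go, hp, hab]⟩

lemma pgsSplitPair (s : List Char) (h : ':' ∈ s) :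
    ∃ a b, PySem.Chars.splitMax? s [':'] 1 = some [a, b] := by
  obtain ⟨a, b, hab⟩ := pgsGoPair (s.length + 1) s [] [] (by omega) h
  exact ⟨a, b, by simp [PySem.Chars.splitMax?, PySem.Chars.splitOnMax, hab]⟩

lemma pgsLowerColon (c : Char) (h : PySem.Chars.lowerChar c = ':') : c = ':' := by
  unfold PySem.Chars.lowerChar at h
  split_ifs at h with hu
  · exfalso
    simp only [PySem.Chars.isupper, Bool.and_eq_true, decide_eq_true_eq] at hu
    have hA : (65 : ℕ) ≤ c.toNat := hu.1
    have hZ : c.toNat ≤ 90 := hu.2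
    have h2 := congrArg Char.toNat h
    rw [Char.toNat_ofNat] at h2
    rw [if_pos (by left; omega : (c.toNat + 32).isValidChar)] at h2
    have h58 : (':' : Char).toNat = 58 := by decide
    omega
  · exact h

lemma pgsColonMem (s p : List Char) (h : PySem.Chars.startswith (PySem.Chars.lower s) p = true)
    (hc : ':' ∈ p) : ':' ∈ s := by
  have hpre : p <+: PySem.Chars.lower s := by
    simpa [PySem.Chars.startswith, List.isPrefixOf_iff_prefix] using h
  have hm : ':' ∈ PySem.Chars.lower s := hpre.subset hc
  simp only [PySem.Chars.lower, List.mem_map] at hm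
  obtain ⟨c, hcs, hlc⟩ := hm
  exact (pgsLowerColon c hlc) ▸ hcs

lemma pgsReplaceGo (fuel : ℕ) : ∀ (l acc : List Char), l.length ≤ fuel →
    PySem.Chars.replace.go [','] [' '] fuel l acc = acc.reverse ++ l.map pgsF := by
  induction fuel with
  | zero => intro l acc h; simp at h; simp [h, PySem.Chars.replace.go]
  | succ fuel ih =>
      intro l acc hlen
      cases l with
      | nil => simp [PySem.Chars.replace.go]
      | cons c rest =>
          by_cases hp : [','].isPrefixOf (c :: rest) = true
          · have hc : c = ',' := by
              have h' := hp; simp [List.isPrefixOf] at h'; exact h'.symm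
            simp [PySem.Chars.replace.go, ih rest _ (by simpa using hlen), hc, pgsF]
          · have hc : c ≠ ',' := by intro heq; exact hp (by simp [List.isPrefixOf, heq])
            simp [PySem.Chars.replace.go, hp, ih rest _ (by simpa using hlen), pgsF, hc]

lemma pgsReplaceMap (l : List Char) :
    PySem.Chars.replace l [','] [' '] = l.map pgsF := by
  simp [PySem.Chars.replace, pgsReplaceGo l.length l [] le_rfl]

lemma pgsSplit0GoWsPre (lead : List Char) : ∀ (v : List Char) (acc : List (List Char)),
    (∀ c ∈ lead, PySem.Chars.isspace c = true) →
    PySem.Chars.split₀.go (lead ++ v) [] acc = PySem.Chars.split₀.go v [] acc := by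
  induction lead with
  | nil => intro v acc _; rfl
  | cons c rest ih =>
      intro v acc hws
      have hc : PySem.Chars.isspace c = true := hws c (by simp)
      simpa [PySem.Chars.split₀.go, hc] using ih v acc (fun d hd => hws d (by simp [hd]))

lemma pgsSplit0GoWsNil (trail : List Char) : ∀ (cur : List Char) (acc : List (List Char)),
    (∀ c ∈ trail, PySem.Chars.isspace c = true) →
    PySem.Chars.split₀.go trail cur acc = PySem.Chars.split₀.go [] cur acc := by
  induction trail with
  | nil => intro cur acc _; rfl
  | cons c rest ih =>
      intro cur acc hws
      have hc : PySem.Chars.isspace c = true := hws c (by simp)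
      have ihr := fun cur' acc' => ih cur' acc' (fun d hd => hws d (by simp [hd]))
      by_cases hcur : cur.isEmpty = true
      · simp [PySem.Chars.split₀.go, hc, hcur, ihr]
      · simp [PySem.Chars.split₀.go, hc, hcur, ihr]

lemma pgsSplit0GoWsSuf (v : List Char) : ∀ (trail cur : List Char) (acc : List (List Char)),
    (∀ c ∈ trail, PySem.Chars.isspace c = true) →
    PySem.Chars.split₀.go (v ++ trail) cur acc = PySem.Chars.split₀.go v cur acc := by
  induction v with
  | nil => intro trail cur acc hws; simpa using pgsSplit0GoWsNil trail cur acc hws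
  | cons c rest ih =>
      intro trail cur acc hws
      by_cases hc : PySem.Chars.isspace c = true
      · by_cases hcur : cur.isEmpty = true
        · simp [PySem.Chars.split₀.go, hc, hcur, ih trail _ _ hws]
        · simp [PySem.Chars.split₀.go, hc, hcur, ih trail _ _ hws]
      · simp [PySem.Chars.split₀.go, hc, ih trail _ _ hws]

lemma pgsStripDecomp (l : List Char) :
    ∃ lead trail, l = lead ++ PySem.Chars.strip l ++ trail ∧
      (∀ c ∈ lead, PySem.Chars.isspace c = true) ∧ (∀ c ∈ trail, PySem.Chars.isspace c = true) := by
  refine ⟨l.takeWhile PySem.Chars.isspace,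
    ((l.dropWhile PySem.Chars.isspace).reverse.takeWhile PySem.Chars.isspace).reverse, ?_, ?_, ?_⟩
  · unfold PySem.Chars.strip PySem.Chars.lstrip PySem.Chars.rstrip
    conv_lhs => rw [← List.takeWhile_append_dropWhile (p := PySem.Chars.isspace) (l := l)]
    rw [List.append_assoc]
    congr 1
    rw [← List.reverse_append, List.takeWhile_append_dropWhile, List.reverse_reverse]
  · intro c hc; exact List.mem_takeWhile_imp hc
  · intro c hc
    rw [List.mem_reverse] at hc; exact List.mem_takeWhile_imp hc

lemma pgsSplit0Strip (l : List Char) :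
    PySem.Chars.split₀ ((PySem.Chars.strip l).map pgsF) = PySem.Chars.split₀ (l.map pgsF) := by
  obtain ⟨lead, trail, hdec, hl, ht⟩ := pgsStripDecomp l
  have hfix : ∀ (w : List Char), (∀ c ∈ w, PySem.Chars.isspace c = true) → w.map pgsF = w := by
    intro w hw
    refine (List.map_congr_left ?_).trans (List.map_id w)
    intro c hc
    have hne : c ≠ ',' := by
      intro heq; have h' := hw c hc; rw [heq] at h'; simp [PySem.Chars.isspace] at h'
    simp [pgsF, hne]
  conv_rhs => rw [hdec]
  simp only [List.map_append, hfix lead hl, hfix trail ht]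
  unfold PySem.Chars.split₀
  rw [List.append_assoc, pgsSplit0GoWsPre lead _ _ hl, pgsSplit0GoWsSuf _ _ _ _ ht]

lemma pgsTokP (l : List Char) : ∀ (cur : List Char) (acc : List (List Char)),
    (∀ x ∈ acc, x ≠ [] ∧ ∀ c ∈ x, PySem.Chars.isspace c = false) →
    (∀ c ∈ cur, PySem.Chars.isspace c = false) →
    ∀ x ∈ PySem.Chars.split₀.go l cur acc, x ≠ [] ∧ ∀ c ∈ x, PySem.Chars.isspace c = false := by
  induction l with
  | nil =>
      intro cur acc hacc hcur x hx
      by_cases hc : cur.isEmpty = true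
      · simp only [PySem.Chars.split₀.go, hc, if_true] at hx
        exact hacc x (by simpa using hx)
      · simp only [PySem.Chars.split₀.go, hc, Bool.false_eq_true, if_false] at hx
        rw [List.mem_reverse] at hx
        rcases List.mem_cons.mp hx with hx' | hx'
        · subst hx'
          refine ⟨by simpa [List.isEmpty_iff] using hc, ?_⟩
          intro d hd; exact hcur d (List.mem_reverse.mp hd)
        · exact hacc x hx'
  | cons c rest ih =>
      intro cur acc hacc hcur x hx
      by_cases hws : PySem.Chars.isspace c = true
      · by_cases hc : cur.isEmpty = true
        · simp only [PySem.Chars.split₀.go, hws, hc, if_true] at hx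
          exact ih [] acc hacc (by simp) x hx
        · simp only [PySem.Chars.split₀.go, hws, hc, if_true, Bool.false_eq_true, if_false] at hx
          refine ih [] (cur.reverse :: acc) ?_ (by simp) x hx
          intro y hy
          rcases List.mem_cons.mp hy with hy' | hy'
          · subst hy'
            refine ⟨by simpa [List.isEmpty_iff] using hc, ?_⟩
            intro d hd; exact hcur d (List.mem_reverse.mp hd)
          · exact hacc y hy'
      · simp only [PySem.Chars.split₀.go, hws, Bool.false_eq_true, if_false] at hx
        refine ih (c :: cur) acc hacc ?_ x hx
        intro d hd
        rcases List.mem_cons.mp hd with hd' | hd'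
        · subst hd'; simpa using hws
        · exact hcur d hd'

lemma pgsTok (u x : List Char) (hx : x ∈ PySem.Chars.split₀ u) :
    x ≠ [] ∧ ∀ c ∈ x, PySem.Chars.isspace c = false := by
  exact pgsTokP u [] [] (by simp) (by simp) x hx

lemma pgsDropWhileId (x : List Char) (h : ∀ c ∈ x, PySem.Chars.isspace c = false) :
    x.dropWhile PySem.Chars.isspace = x := by
  cases x with
  | nil => rfl
  | cons c t =>
      rw [List.dropWhile_cons]
      simp [h c (by simp)]

lemma pgsStripId (x : List Char) (h : ∀ c ∈ x, PySem.Chars.isspace c = false) :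
    PySem.Chars.strip x = x := by
  unfold PySem.Chars.strip PySem.Chars.lstrip PySem.Chars.rstrip
  rw [pgsDropWhileId x h, pgsDropWhileId x.reverse (fun c hc => h c (List.mem_reverse.mp hc)),
    List.reverse_reverse]

lemma pgsOfListBeqEmpty (z : List Char) : (String.ofList z == "") = (z == []) := by
  by_cases h : z = []
  · subst h; rfl
  · have hne : String.ofList z ≠ "" := by
      intro hc
      exact h (by simpa using congrArg String.toList hc)
    rw [beq_eq_false_iff_ne.mpr hne, beq_eq_false_iff_ne.mpr h]

lemma pgsTokensEq (p1 : String) :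
    ((PySem.Str.split₀ (PySem.Str.replace (PySem.Str.strip p1) "," " ")).filter
        (fun x => !(PySem.Str.strip x == ""))).map (fun x => PySem.Str.strip x) =
      PySem.Str.split₀ (PySem.Str.replace p1 "," " ") := by
  unfold PySem.Str.split₀
  rw [PySem.Str.toList_replace, PySem.Str.toList_replace, PySem.Str.toList_strip]
  have hcomma : ("," : String).toList = [','] := by decide
  have hspace : (" " : String).toList = [' '] := by decide
  rw [hcomma, hspace, pgsReplaceMap, pgsReplaceMap, pgsSplit0Strip]
  set T := PySem.Chars.split₀ (p1.toList.map pgsF) with hT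
  rw [List.filter_map]
  have hfil : (T.filter ((fun x => !(PySem.Str.strip x == "")) ∘ String.ofList)) = T := by
    rw [List.filter_eq_self]
    intro y hy
    obtain ⟨hne, hws⟩ := pgsTok _ y hy
    simp only [Function.comp_apply, PySem.Str.strip, String.toList_ofList, pgsStripId y hws,
      pgsOfListBeqEmpty]
    simpa using hne
  rw [hfil, List.map_map]
  apply List.map_congr_left
  intro y hy
  obtain ⟨hne, hws⟩ := pgsTok _ y hy
  simp only [Function.comp_apply, PySem.Str.strip, String.toList_ofList, pgsStripId y hws]

lemma pgsCondSplit (line : String) (h : pgsCond line = true) :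
    ∃ a b, PySem.Str.splitMax? (PySem.Str.strip line) ":" 1
      = some [String.ofList a, String.ofList b] := by
  have hcol : ':' ∈ (PySem.Str.strip line).toList := by
    unfold pgsCond at h
    rcases Bool.or_eq_true_iff.mp h with h' | h'
    · refine pgsColonMem _ ("`- jail list:".toList) ?_ (by decide)
      simpa [PySem.Str.startswith, PySem.Str.toList_lower] using h'
    · refine pgsColonMem _ ("- jail list:".toList) ?_ (by decide)
      simpa [PySem.Str.startswith, PySem.Str.toList_lower] using h'
  obtain ⟨a, b, hab⟩ := pgsSplitPair _ hcol
  refine ⟨a, b, ?_⟩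
  unfold PySem.Str.splitMax?
  rw [show (":" : String).toList = [':'] from by decide, hab]
  rfl

lemma pgsStepFind (j : List String) (line : String) (rest : List String)
    (h : pgsCond line = true) : pgsStepA j line = pgsFindB (line :: rest) := by
  obtain ⟨a, b, hab⟩ := pgsCondSplit line h
  unfold pgsCond at h
  unfold pgsStepA pgsFindB
  simp only [h, if_true, hab]
  show _ = PySem.Str.split₀ (PySem.Str.replace
      (((some [String.ofList a, String.ofList b]).bind
        (fun parts => PySem.List.pyGet? parts 1)).getD "") "," " ")
  simp only [Option.bind_some]
  rw [show PySem.List.pyGet? [String.ofList a, String.ofList b] 1 = some (String.ofList b) from by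
    simp [PySem.List.pyGet?, PySem.List.pyIdx?]]
  exact pgsTokensEq (String.ofList b)

lemma pgsStepSkip (j : List String) (line : String) (h : pgsCond line = false) :
    pgsStepA j line = j := by
  unfold pgsCond at h
  unfold pgsStepA
  simp only [h, Bool.false_eq_true, if_false]

lemma pgsFindSkip (line : String) (rest : List String) (h : pgsCond line = false) :
    pgsFindB (line :: rest) = pgsFindB rest := by
  unfold pgsCond at h
  conv_lhs => rw [pgsFindB]
  simp only [h, Bool.false_eq_true, if_false]

lemma pgsFold (lines : List String) :
    lines.foldl pgsStepA [] = pgsFindB lines.reverse := by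
  induction lines using List.reverseRecOn with
  | nil => rfl
  | append_singleton ls x ih =>
      rw [List.foldl_append, List.reverse_append]
      simp only [List.foldl_cons, List.foldl_nil, List.reverse_singleton, List.singleton_append]
      by_cases h : pgsCond x = true
      · exact pgsStepFind _ x ls.reverse h
      · rw [pgsStepSkip _ x (by simpa using h), ih, pgsFindSkip x _ (by simpa using h)]

-- ===== VERDICT (by name: the statement is the Claim_ definition above) =====
theorem parse_global_status_spec : Claim_equal_parse_global_status := by
  intro output _
  unfold Spec_parse_global_status parse_global_status parse_global_status_alt
  rw [pgsFold]
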